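-- pv_equiv track=rewrite | github.com/sergioavila-creator/CartoriosBR | extrai_transp_tjrj.py | extrator_separar_cidade_designacao
-- ===== SOURCE A (Python) =====
-- from unicodedata import normalize
--
-- MUNICIPIOS_RJ = [
--     "ANGRA DOS REIS", "APERIBE", "ARARUAMA", "AREAL", "ARMACAO DOS BUZIOS",
--     "ARRAIAL DO CABO", "BARRA DO PIRAI", "BARRA MANSA", "BELFORD ROXO", "BOM JARDIM",
--     "BOM JESUS DO ITABAPOANA", "CABO FRIO", "CACHOEIRAS DE MACACU", "CAMBUCI", "CAMPOS DOS GOYTACAZES",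
--     "CANTAGALO", "CARAPEBUS", "CARDOSO MOREIRA", "CARMO", "CASIMIRO DE ABREU", "COMENDADOR LEVY GASPARIAN",
--     "CONCEICAO DE MACABU", "CORDEIRO", "DUAS BARRAS", "DUQUE DE CAXIAS",
--     "ENGENHEIRO PAULO DE FRONTIN", "GUAPIMIRIM", "IGUABA GRANDE", "ITABORAI", "ITAGUAI",
--     "ITALVA", "ITAOCARA", "ITAPERUNA", "ITATIAIA", "JAPERI", "LAJE DO MURIAE", "MACAE",
--     "MACUCO", "MAGE", "MANGARATIBA", "MARICA", "MENDES", "MESQUITA", "MIGUEL PEREIRA",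
--     "MIRACEMA", "NATIVIDADE", "NILOPOLIS", "NITEROI", "NOVA FRIBURGO", "NOVA IGUACU",
--     "PARACAMBI", "PARAIBA DO SUL", "PARATY", "PATY DO ALFERES", "PETROPOLIS",
--     "PINHEIRAL", "PIRAI", "PORCIUNCULA", "PORTO REAL", "QUATIS", "QUEIMADOS", "QUISSAMA",
--     "RESENDE", "RIO BONITO", "RIO CLARO", "RIO DAS FLORES", "RIO DAS OSTRAS", "RIO DE JANEIRO",
--     "SANTA MARIA MADALENA", "SANTO ANTONIO DE PADUA", "SAO FIDELIS",
--     "SAO FRANCISCO DE ITABAPOANA", "SAO GONCALO",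
--     "SAO JOAO DA BARRA", "SAO JOAO DE MERITI",
--     "SAO JOSE DE UBA", "SAO JOSE DO VALE DO RIO PRETO",
--     "SAO PEDRO DA ALDEIA", "SAO SEBASTIAO DO ALTO",
--     "SAPUCAIA", "SAQUAREMA", "SEROPEDICA", "SILVA JARDIM", "SUMIDOURO", "TANGUA",
--     "TERESOPOLIS", "TRAJANO DE MORAES", "TRES RIOS", "VALENCA",
--     "VARRE-SAI", "VASSOURAS", "VOLTA REDONDA", "CAPITAL"
-- ]
--
-- def extrator_normalizar_para_match(texto):
--     if not texto: return ""
--     return normalize('NFKD', texto).encode('ASCII', 'ignore').decode('ASCII').upper().strip()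
--
-- def extrator_separar_cidade_designacao(texto_completo):
--     """Separa o nome do município da designação do cartório."""
--     if not texto_completo: return "", ""
--     texto_norm = extrator_normalizar_para_match(texto_completo)
--     municipios_ordenados = sorted(MUNICIPIOS_RJ, key=len, reverse=True)
--
--     for municipio in municipios_ordenados:
--         if texto_norm.startswith(municipio):
--             designacao = texto_norm[len(municipio):].strip()
--             if designacao.startswith("-"): designacao = designacao[1:].strip()
--             return municipio, designacao
--     return "OUTRA/VERIFICAR", texto_completo
-- ===== SOURCE B (Python) =====
-- from unicodedata import normalize
--
-- MUNICIPIOS_RJ = [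
--     "ANGRA DOS REIS", "APERIBE", "ARARUAMA", "AREAL", "ARMACAO DOS BUZIOS",
--     "ARRAIAL DO CABO", "BARRA DO PIRAI", "BARRA MANSA", "BELFORD ROXO", "BOM JARDIM",
--     "BOM JESUS DO ITABAPOANA", "CABO FRIO", "CACHOEIRAS DE MACACU", "CAMBUCI", "CAMPOS DOS GOYTACAZES",
--     "CANTAGALO", "CARAPEBUS", "CARDOSO MOREIRA", "CARMO", "CASIMIRO DE ABREU", "COMENDADOR LEVY GASPARIAN",
--     "CONCEICAO DE MACABU", "CORDEIRO", "DUAS BARRAS", "DUQUE DE CAXIAS",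
--     "ENGENHEIRO PAULO DE FRONTIN", "GUAPIMIRIM", "IGUABA GRANDE", "ITABORAI", "ITAGUAI",
--     "ITALVA", "ITAOCARA", "ITAPERUNA", "ITATIAIA", "JAPERI", "LAJE DO MURIAE", "MACAE",
--     "MACUCO", "MAGE", "MANGARATIBA", "MARICA", "MENDES", "MESQUITA", "MIGUEL PEREIRA",
--     "MIRACEMA", "NATIVIDADE", "NILOPOLIS", "NITEROI", "NOVA FRIBURGO", "NOVA IGUACU",
--     "PARACAMBI", "PARAIBA DO SUL", "PARATY", "PATY DO ALFERES", "PETROPOLIS",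
--     "PINHEIRAL", "PIRAI", "PORCIUNCULA", "PORTO REAL", "QUATIS", "QUEIMADOS", "QUISSAMA",
--     "RESENDE", "RIO BONITO", "RIO CLARO", "RIO DAS FLORES", "RIO DAS OSTRAS", "RIO DE JANEIRO",
--     "SANTA MARIA MADALENA", "SANTO ANTONIO DE PADUA", "SAO FIDELIS",
--     "SAO FRANCISCO DE ITABAPOANA", "SAO GONCALO",
--     "SAO JOAO DA BARRA", "SAO JOAO DE MERITI",
--     "SAO JOSE DE UBA", "SAO JOSE DO VALE DO RIO PRETO",
--     "SAO PEDRO DA ALDEIA", "SAO SEBASTIAO DO ALTO",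
--     "SAPUCAIA", "SAQUAREMA", "SEROPEDICA", "SILVA JARDIM", "SUMIDOURO", "TANGUA",
--     "TERESOPOLIS", "TRAJANO DE MORAES", "TRES RIOS", "VALENCA",
--     "VARRE-SAI", "VASSOURAS", "VOLTA REDONDA", "CAPITAL"
-- ]
--
--
-- def _normalizar(texto):
--     if not texto:
--         return ""
--     return normalize('NFKD', texto).encode('ASCII', 'ignore').decode('ASCII').upper().strip()
--
--
-- def extrator_separar_cidade_designacao(texto_completo):
--     """Separa o nome do municipio da designacao do cartorio.
--
--     Uma passada sobre MUNICIPIOS_RJ na ordem original, guardando o prefixo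
--     correspondente mais longo (sem ordenar a lista); ao final recorta a
--     designacao de uma vez."""
--     if not texto_completo:
--         return "", ""
--     texto_norm = _normalizar(texto_completo)
--     best = None
--     for m in MUNICIPIOS_RJ:
--         if texto_norm.startswith(m) and (best is None or len(best) < len(m)):
--             best = m
--     if best is None:
--         return "OUTRA/VERIFICAR", texto_completo
--     rest = texto_norm[len(best):].strip()
--     return best, rest.removeprefix("-").strip()
-- ===== Notes on version B (the rewrite author's own statement) =====
-- stated objective: alternative
-- what changed: Instead of sorting the municipality list by length and returning at the first prefix match, B makes a single pass over the unsorted list keeping the longest matching prefix in an accumulator, and builds the designation afterwards in one expression with removeprefix instead of A's conditional re-slice.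
import Mathlib
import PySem

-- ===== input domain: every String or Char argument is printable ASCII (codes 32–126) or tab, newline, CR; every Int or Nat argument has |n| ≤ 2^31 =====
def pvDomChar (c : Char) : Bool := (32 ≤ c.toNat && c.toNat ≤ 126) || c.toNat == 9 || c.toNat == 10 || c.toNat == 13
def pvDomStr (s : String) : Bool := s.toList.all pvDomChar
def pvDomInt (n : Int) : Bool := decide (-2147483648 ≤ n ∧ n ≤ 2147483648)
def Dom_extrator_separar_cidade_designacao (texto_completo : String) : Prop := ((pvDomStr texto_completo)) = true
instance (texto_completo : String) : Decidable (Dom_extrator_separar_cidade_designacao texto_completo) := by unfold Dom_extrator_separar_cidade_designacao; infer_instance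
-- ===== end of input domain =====

-- B replaces A's sort-by-length-then-first-match with a single unsorted pass keeping the longest
-- matching prefix in an accumulator (objective: alternative decomposition, same cost).

-- ===== PORT A =====
def pvMunicipiosRJ : List String := [
  "ANGRA DOS REIS", "APERIBE", "ARARUAMA", "AREAL", "ARMACAO DOS BUZIOS",
  "ARRAIAL DO CABO", "BARRA DO PIRAI", "BARRA MANSA", "BELFORD ROXO", "BOM JARDIM",
  "BOM JESUS DO ITABAPOANA", "CABO FRIO", "CACHOEIRAS DE MACACU", "CAMBUCI", "CAMPOS DOS GOYTACAZES",
  "CANTAGALO", "CARAPEBUS", "CARDOSO MOREIRA", "CARMO", "CASIMIRO DE ABREU",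
  "COMENDADOR LEVY GASPARIAN", "CONCEICAO DE MACABU", "CORDEIRO", "DUAS BARRAS", "DUQUE DE CAXIAS",
  "ENGENHEIRO PAULO DE FRONTIN", "GUAPIMIRIM", "IGUABA GRANDE", "ITABORAI", "ITAGUAI",
  "ITALVA", "ITAOCARA", "ITAPERUNA", "ITATIAIA", "JAPERI",
  "LAJE DO MURIAE", "MACAE", "MACUCO", "MAGE", "MANGARATIBA",
  "MARICA", "MENDES", "MESQUITA", "MIGUEL PEREIRA", "MIRACEMA",
  "NATIVIDADE", "NILOPOLIS", "NITEROI", "NOVA FRIBURGO", "NOVA IGUACU",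
  "PARACAMBI", "PARAIBA DO SUL", "PARATY", "PATY DO ALFERES", "PETROPOLIS",
  "PINHEIRAL", "PIRAI", "PORCIUNCULA", "PORTO REAL", "QUATIS",
  "QUEIMADOS", "QUISSAMA", "RESENDE", "RIO BONITO", "RIO CLARO",
  "RIO DAS FLORES", "RIO DAS OSTRAS", "RIO DE JANEIRO", "SANTA MARIA MADALENA", "SANTO ANTONIO DE PADUA",
  "SAO FIDELIS", "SAO FRANCISCO DE ITABAPOANA", "SAO GONCALO", "SAO JOAO DA BARRA", "SAO JOAO DE MERITI",
  "SAO JOSE DE UBA", "SAO JOSE DO VALE DO RIO PRETO", "SAO PEDRO DA ALDEIA", "SAO SEBASTIAO DO ALTO", "SAPUCAIA",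
  "SAQUAREMA", "SEROPEDICA", "SILVA JARDIM", "SUMIDOURO", "TANGUA",
  "TERESOPOLIS", "TRAJANO DE MORAES", "TRES RIOS", "VALENCA", "VARRE-SAI",
  "VASSOURAS", "VOLTA REDONDA", "CAPITAL"]

-- NFKD normalization followed by ASCII encode('ignore')/decode is the identity on the printable-ASCII
-- input domain Dom_, so on Dom_ the normalizer is exactly upper() then strip() (exact on Dom_).
def extrator_normalizar_para_match (texto : String) : String :=
  if texto = "" then "" else PySem.Str.strip (PySem.Str.upper texto)

def pvMatchA (texto_norm texto_completo : String) : List String → String × String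
  | [] => ("OUTRA/VERIFICAR", texto_completo)
  | municipio :: rest =>
    if PySem.Str.startswith texto_norm municipio then
      let d0 := PySem.Str.strip (PySem.Str.slice texto_norm (some (PySem.Str.len municipio)) none)
      let designacao := if PySem.Str.startswith d0 "-" then PySem.Str.strip (PySem.Str.slice d0 (some 1) none) else d0
      (municipio, designacao)
    else pvMatchA texto_norm texto_completo rest

def extrator_separar_cidade_designacao (texto_completo : String) : String × String :=
  if texto_completo = "" then ("", "")
  else
    let texto_norm := extrator_normalizar_para_match texto_completo
    let municipios_ordenados := PySem.List.sorted pvMunicipiosRJ (fun m => PySem.Str.len m) true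
    pvMatchA texto_norm texto_completo municipios_ordenados

-- ===== PORT B =====
-- same normalization helper as in Source B (identity NFKD step dropped on the ASCII Dom_, as in port A)
def pvNormB (texto : String) : String :=
  if texto = "" then "" else PySem.Str.strip (PySem.Str.upper texto)

-- loop body: 'if texto_norm.startswith(m) and (best is None or len(best) < len(m)): best = m'
def pvStepB (texto_norm : String) (best : Option String) (m : String) : Option String :=
  if PySem.Str.startswith texto_norm m &&
      (match best with | none => true | some b => decide (PySem.Str.len b < PySem.Str.len m))
  then some m else best

-- hand port of rest.removeprefix("-"): if the string starts with "-", drop that prefix (exact)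
def pvRemoveDash (s : String) : String :=
  if PySem.Str.startswith s "-" then String.ofList (s.toList.drop 1) else s

def extrator_separar_cidade_designacao_alt (texto_completo : String) : String × String :=
  if texto_completo = "" then ("", "")
  else
    let texto_norm := pvNormB texto_completo
    match pvMunicipiosRJ.foldl (pvStepB texto_norm) none with
    | none => ("OUTRA/VERIFICAR", texto_completo)
    | some best =>
        let rest := PySem.Str.strip (PySem.Str.slice texto_norm (some (PySem.Str.len best)) none)
        (best, PySem.Str.strip (pvRemoveDash rest))

-- ===== PRECONDITION & SPEC =====
def Spec_extrator_separar_cidade_designacao (texto_completo : String) (out : String × String) : Prop := out = extrator_separar_cidade_designacao_alt texto_completo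
instance (texto_completo : String) (out : String × String) : Decidable (Spec_extrator_separar_cidade_designacao texto_completo out) := by unfold Spec_extrator_separar_cidade_designacao; infer_instance

-- ===== CLAIM (what is proved, stated in full; the proofs are below) =====
def Claim_equal_extrator_separar_cidade_designacao : Prop := ∀ (texto_completo : String), Dom_extrator_separar_cidade_designacao texto_completo → Spec_extrator_separar_cidade_designacao texto_completo (extrator_separar_cidade_designacao texto_completo)

-- ===== LEMMAS AND PROOFS =====

-- the value A's loop returns once it reaches a matching municipality of length l
def pvAnswer (t : String) (l : Int) : String × String :=
  let cand := PySem.Str.slice t none (some l)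
  let d0 := PySem.Str.strip (PySem.Str.slice t (some l) none)
  let designacao := if PySem.Str.startswith d0 "-" then PySem.Str.strip (PySem.Str.slice d0 (some 1) none) else d0
  (cand, designacao)

theorem pv_sw_iff (t m : String) : PySem.Str.startswith t m = true ↔ m.toList <+: t.toList := by
  rw [PySem.Str.startswith_eq, PySem.Chars.startswith_iff]

theorem pv_slice_toList (t : String) (l : Int) (hl : 0 ≤ l) :
    (PySem.Str.slice t none (some l)).toList = t.toList.take l.toNat := by
  rw [PySem.Str.toList_slice, PySem.Chars.slice_eq_listSlice, PySem.List.slice_to _ hl]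

theorem pv_slice_eq_of_prefix (t m : String) (h : m.toList <+: t.toList) :
    PySem.Str.slice t none (some (PySem.Str.len m)) = m := by
  rw [← String.toList_inj, PySem.Str.len_eq,
      pv_slice_toList _ _ (by positivity)]
  simpa using (List.prefix_iff_eq_take.mp h).symm

theorem pv_matchA_none (t tc : String) (L : List String)
    (h : ∀ m ∈ L, PySem.Str.startswith t m = false) :
    pvMatchA t tc L = ("OUTRA/VERIFICAR", tc) := by
  induction L with
  | nil => rfl
  | cons m rest ih =>
      simp only [pvMatchA, h m (List.mem_cons_self), Bool.false_eq_true, if_false]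
      exact ih fun m' hm' => h m' (List.mem_cons_of_mem _ hm')

theorem pv_matchA_found (t tc m₀ : String) (L₁ L₂ : List String)
    (hskip : ∀ m ∈ L₁, PySem.Str.startswith t m = false)
    (hm : PySem.Str.startswith t m₀ = true) :
    pvMatchA t tc (L₁ ++ m₀ :: L₂) = pvAnswer t (PySem.Str.len m₀) := by
  induction L₁ with
  | nil =>
      simp only [List.nil_append, pvMatchA, hm, if_true, pvAnswer]
      rw [pv_slice_eq_of_prefix t m₀ ((pv_sw_iff t m₀).mp hm)]
  | cons m rest ih =>
      simp only [List.cons_append, pvMatchA, hskip m (List.mem_cons_self), Bool.false_eq_true, if_false]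
      exact ih fun m' hm' => hskip m' (List.mem_cons_of_mem _ hm')

-- strip is idempotent (B strips the remainder once up front, A re-strips after cutting the dash)
theorem pv_strip_idem (l : List Char) : PySem.Chars.strip (PySem.Chars.strip l) = PySem.Chars.strip l := by
  unfold PySem.Chars.strip PySem.Chars.rstrip PySem.Chars.lstrip
  set p := PySem.Chars.isspace
  set A := List.dropWhile p l with hA
  set B := List.dropWhile p A.reverse with hB
  have hBpre : B.reverse <+: A := by
    rw [← List.reverse_reverse A]
    exact List.reverse_prefix.mpr (List.dropWhile_suffix p)
  have h1 : List.dropWhile p B.reverse = B.reverse := by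
    rw [List.dropWhile_eq_self_iff]
    intro hl
    have h0A : 0 < A.length := lt_of_lt_of_le hl hBpre.length_le
    have hget : B.reverse[0] = A[0] := hBpre.getElem hl
    rw [hget]
    have hAA : List.dropWhile p A = A := by rw [hA]; exact List.dropWhile_idempotent p l
    exact List.dropWhile_eq_self_iff.mp hAA h0A
  rw [h1, List.reverse_reverse, hB, List.dropWhile_idempotent]

-- A's conditional dash-cut on an already-stripped remainder equals B's strip∘removeprefix
theorem pv_dash_eq (d : String) (y : List Char) (hdl : d.toList = PySem.Chars.strip y) :
    (if PySem.Str.startswith d "-" then PySem.Str.strip (PySem.Str.slice d (some 1) none) else d) =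
    PySem.Str.strip (pvRemoveDash d) := by
  unfold pvRemoveDash
  by_cases hsw : PySem.Str.startswith d "-" = true
  · simp only [hsw, if_true]
    rw [← String.toList_inj, PySem.Str.toList_strip, PySem.Str.toList_strip,
        PySem.Str.toList_slice, PySem.Chars.slice_eq_listSlice, PySem.List.slice_from _ (by norm_num)]
    congr 1
    simp
  · rw [Bool.not_eq_true] at hsw
    simp only [hsw, Bool.false_eq_true, if_false]
    rw [← String.toList_inj, PySem.Str.toList_strip, hdl, pv_strip_idem]

-- two municipalities that are both prefixes of t and have the same length are equal
theorem pv_match_unique (t a b : String)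
    (ha : PySem.Str.startswith t a = true) (hb : PySem.Str.startswith t b = true)
    (hl : PySem.Str.len a = PySem.Str.len b) : a = b := by
  rw [pv_sw_iff] at ha hb
  rw [PySem.Str.len_eq, PySem.Str.len_eq, Nat.cast_inj] at hl
  rw [← String.toList_inj, List.prefix_iff_eq_take.mp ha, List.prefix_iff_eq_take.mp hb, hl]

-- the three possible outcomes of one step of B's running-best loop
theorem pvStepB_trichotomy (t : String) (acc : Option String) (m : String) :
    (pvStepB t acc m = some m ∧ PySem.Str.startswith t m = true ∧
       (∀ b0, acc = some b0 → PySem.Str.len b0 ≤ PySem.Str.len m)) ∨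
    (pvStepB t acc m = acc ∧ (PySem.Str.startswith t m = true →
       ∃ b0, acc = some b0 ∧ PySem.Str.len m ≤ PySem.Str.len b0)) := by
  match acc with
  | none =>
      by_cases hsw : PySem.Str.startswith t m = true
      · refine Or.inl ⟨?_, hsw, by intro b0 h0; cases h0⟩
        unfold pvStepB; rw [hsw]; rfl
      · refine Or.inr ⟨?_, fun h => absurd h hsw⟩
        rw [Bool.not_eq_true] at hsw
        unfold pvStepB; rw [hsw]; rfl
  | some b0 =>
      by_cases hsw : PySem.Str.startswith t m = true
      · by_cases hlt : PySem.Str.len b0 < PySem.Str.len m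
        · have hlt' : b0.length < m.length := by
            rw [PySem.Str.len_eq, PySem.Str.len_eq] at hlt; exact_mod_cast hlt
          refine Or.inl ⟨?_, hsw, ?_⟩
          · unfold pvStepB; rw [hsw]; simp [hlt']
          · intro b1 h1; injection h1 with h1; subst h1; omega
        · have hlt' : ¬ b0.length < m.length := by
            rw [PySem.Str.len_eq, PySem.Str.len_eq] at hlt; exact_mod_cast hlt
          refine Or.inr ⟨?_, fun _ => ⟨b0, rfl, by omega⟩⟩
          unfold pvStepB; rw [hsw]; simp [hlt']
      · refine Or.inr ⟨?_, fun h => absurd h hsw⟩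
        rw [Bool.not_eq_true] at hsw
        unfold pvStepB; rw [hsw]; rfl

-- invariant of B's running-best fold
theorem pv_foldB_spec (t : String) (L : List String) (acc : Option String) :
    (L.foldl (pvStepB t) acc = none → acc = none ∧ ∀ m ∈ L, PySem.Str.startswith t m = false) ∧
    (∀ b, L.foldl (pvStepB t) acc = some b →
       (b ∈ L ∧ PySem.Str.startswith t b = true) ∨ acc = some b) ∧
    (∀ b, L.foldl (pvStepB t) acc = some b →
       (∀ m ∈ L, PySem.Str.startswith t m = true → PySem.Str.len m ≤ PySem.Str.len b) ∧
       (∀ b0, acc = some b0 → PySem.Str.len b0 ≤ PySem.Str.len b)) := by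
  induction L generalizing acc with
  | nil =>
      exact ⟨fun h => ⟨h, by simp⟩, fun b h => Or.inr h,
        fun b h => ⟨by simp, fun b0 h0 => by rw [h0] at h; injection h with h; rw [h]⟩⟩
  | cons m rest ih =>
      have hstep : ∀ (r : Option String), List.foldl (pvStepB t) acc (m :: rest) = r ↔
          List.foldl (pvStepB t) (pvStepB t acc m) rest = r := by intro r; rfl
      refine ⟨?_, ?_, ?_⟩
      · intro h
        rw [hstep] at h
        obtain ⟨hacc', hrest⟩ := (ih (pvStepB t acc m)).1 h
        rcases pvStepB_trichotomy t acc m with ⟨heq, _, _⟩ | ⟨heq, himp⟩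
        · rw [heq] at hacc'; cases hacc'
        · rw [heq] at hacc'
          refine ⟨hacc', fun x hx => ?_⟩
          rcases List.mem_cons.mp hx with hx | hx
          · subst hx
            cases hsw : PySem.Str.startswith t x with
            | false => rfl
            | true =>
                obtain ⟨b0, hb0, _⟩ := himp hsw
                rw [hacc'] at hb0
                cases hb0
          · exact hrest x hx
      · intro b h
        rw [hstep] at h
        rcases ((ih (pvStepB t acc m)).2.1 b h) with ⟨hbL, hbw⟩ | hacc'
        · exact Or.inl ⟨List.mem_cons_of_mem _ hbL, hbw⟩
        · rcases pvStepB_trichotomy t acc m with ⟨heq, hsw, _⟩ | ⟨heq, _⟩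
          · rw [heq] at hacc'
            injection hacc' with hbm
            subst hbm
            exact Or.inl ⟨List.mem_cons_self, hsw⟩
          · rw [heq] at hacc'
            exact Or.inr hacc'
      · intro b h
        rw [hstep] at h
        obtain ⟨hmaxR, hmono⟩ := (ih (pvStepB t acc m)).2.2 b h
        rcases pvStepB_trichotomy t acc m with ⟨heq, _, hge⟩ | ⟨heq, himp⟩
        · have hmb : PySem.Str.len m ≤ PySem.Str.len b := hmono m heq
          refine ⟨fun x hx hxw => ?_, fun b0 h0 => le_trans (hge b0 h0) hmb⟩
          rcases List.mem_cons.mp hx with hx | hx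
          · subst hx; exact hmb
          · exact hmaxR x hx hxw
        · refine ⟨fun x hx hxw => ?_, fun b0 h0 => hmono b0 (by rw [heq, h0])⟩
          rcases List.mem_cons.mp hx with hx | hx
          · subst hx
            obtain ⟨b0, hb0, hle⟩ := himp hxw
            have := hmono b0 (by rw [heq, hb0])
            omega
          · exact hmaxR x hx hxw

-- ===== VERDICT (by name: the statement is the Claim_ definition above) =====
theorem extrator_separar_cidade_designacao_spec : Claim_equal_extrator_separar_cidade_designacao := by
  intro tc _hDom
  unfold Spec_extrator_separar_cidade_designacao
  by_cases h0 : tc = ""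
  · simp [extrator_separar_cidade_designacao, extrator_separar_cidade_designacao_alt, h0]
  · unfold extrator_separar_cidade_designacao extrator_separar_cidade_designacao_alt
    rw [if_neg h0, if_neg h0]
    have hnorm : pvNormB tc = extrator_normalizar_para_match tc := rfl
    rw [hnorm]
    set t := extrator_normalizar_para_match tc with ht
    set L := PySem.List.sorted pvMunicipiosRJ (fun m => PySem.Str.len m) true with hL
    show pvMatchA t tc L =
      (match pvMunicipiosRJ.foldl (pvStepB t) none with
       | none => ("OUTRA/VERIFICAR", tc)
       | some best =>
           (best, PySem.Str.strip (pvRemoveDash (PySem.Str.strip (PySem.Str.slice t (some (PySem.Str.len best)) none)))))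
    obtain ⟨hnone, hsomeMem, hsomeMax⟩ := pv_foldB_spec t pvMunicipiosRJ none
    by_cases hex : ∃ m ∈ L, PySem.Str.startswith t m = true
    · -- a municipality matches: both return the unique longest matching prefix
      have hfind : ∃ m₀, List.find? (fun m => PySem.Str.startswith t m) L = some m₀ := by
        obtain ⟨m, hm, hp⟩ := hex
        exact Option.isSome_iff_exists.mp (List.find?_isSome.mpr ⟨m, hm, hp⟩)
      obtain ⟨m₀, hm₀⟩ := hfind
      rw [List.find?_eq_some_iff_append] at hm₀
      obtain ⟨hp₀, L₁, L₂, hsplit, hskip⟩ := hm₀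
      have hskip' : ∀ m ∈ L₁, PySem.Str.startswith t m = false := by
        intro m hm; simpa using hskip m hm
      have hm₀L : m₀ ∈ L := by rw [hsplit]; simp
      have hm₀M : m₀ ∈ pvMunicipiosRJ := (PySem.List.mem_sorted _ _ _ _).mp hm₀L
      -- m₀ is length-maximal among all matches (sorted desc by length, none before it matches)
      have hmaxA : ∀ m ∈ pvMunicipiosRJ, PySem.Str.startswith t m = true →
          PySem.Str.len m ≤ PySem.Str.len m₀ := by
        intro m hm hmw
        have hmL : m ∈ L := (PySem.List.mem_sorted _ _ _ _).mpr hm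
        rw [hsplit] at hmL
        rcases List.mem_append.mp hmL with hc1 | hc2
        · rw [hskip' m hc1] at hmw; exact absurd hmw (by decide)
        · rcases List.mem_cons.mp hc2 with hceq | hc3
          · rw [hceq]
          · have hpw : List.Pairwise (fun a b => PySem.Str.len b ≤ PySem.Str.len a) L :=
              PySem.List.sorted_pairwise_rev pvMunicipiosRJ (fun m => PySem.Str.len m)
            rw [hsplit] at hpw
            have hpw2 := (List.pairwise_append.mp hpw).2.1
            exact (List.pairwise_cons.mp hpw2).1 m hc3
      -- B's fold cannot return none (m₀ matches)
      match hr : pvMunicipiosRJ.foldl (pvStepB t) none with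
      | none =>
          obtain ⟨_, hall⟩ := hnone hr
          rw [hall m₀ hm₀M] at hp₀
          exact absurd hp₀ (by decide)
      | some b =>
          rcases hsomeMem b hr with ⟨hbM, hbw⟩ | habs
          · obtain ⟨hmaxB, _⟩ := hsomeMax b hr
            have h1 : PySem.Str.len b ≤ PySem.Str.len m₀ := hmaxA b hbM hbw
            have h2 : PySem.Str.len m₀ ≤ PySem.Str.len b := hmaxB m₀ hm₀M hp₀
            have hbm₀ : b = m₀ := pv_match_unique t b m₀ hbw hp₀ (le_antisymm h1 h2)
            subst hbm₀
            rw [hsplit, pv_matchA_found t tc b L₁ L₂ hskip' hp₀]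
            show pvAnswer t (PySem.Str.len b) =
              (b, PySem.Str.strip (pvRemoveDash (PySem.Str.strip (PySem.Str.slice t (some (PySem.Str.len b)) none))))
            unfold pvAnswer
            rw [pv_slice_eq_of_prefix t b ((pv_sw_iff t b).mp hbw)]
            exact congrArg (fun z => (b, z)) (pv_dash_eq _ _ (PySem.Str.toList_strip _))
          · exact absurd habs (by simp)
    · -- no municipality matches: both fall back
      push Not at hex
      have hall : ∀ m ∈ L, PySem.Str.startswith t m = false := by
        intro m hm
        have := hex m hm
        exact Bool.eq_false_iff.mpr this
      rw [pv_matchA_none t tc L hall]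
      match hr : pvMunicipiosRJ.foldl (pvStepB t) none with
      | none => rfl
      | some b =>
          rcases hsomeMem b hr with ⟨hbM, hbw⟩ | habs
          · have hbL : b ∈ L := (PySem.List.mem_sorted _ _ _ _).mpr hbM
            rw [hall b hbL] at hbw
            exact absurd hbw (by decide)
          · exact absurd habs (by simp)
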